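-- pv_equiv track=rewrite | github.com/thxmxs15/-veille-kine-sport- | fetch_articles.py | clean_xml
-- ===== SOURCE A (Python) =====
-- def clean_xml(text):
--     """Nettoie le texte XML."""
--     text = text.replace("&lt;", "<").replace("&gt;", ">")
--     text = text.replace("&amp;", "&").replace("&quot;", '"').replace("&apos;", "'")
--     result = ""
--     in_tag = False
--     for char in text:
--         if char == "<":
--             in_tag = True
--         elif char == ">":
--             in_tag = False
--         elif not in_tag:
--             result += char
--     return result.strip()
-- ===== SOURCE B (Python) =====
-- def clean_xml(text):
--     """Nettoie le texte XML."""
--     text = text.replace("&lt;", "<").replace("&gt;", ">")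
--     text = text.replace("&amp;", "&").replace("&quot;", '"').replace("&apos;", "'")
--     head, *rest = text.split("<")
--     pieces = [head] + [part.partition(">")[2] for part in rest]
--     return "".join(pieces).replace(">", "").strip()
-- ===== Notes on version B (the rewrite author's own statement) =====
-- stated objective: idiomatic
-- what changed: Replaced the char-by-char in_tag state machine (which grows result one character at a time) with a split-on-'<' decomposition: keep the head segment and, for each later segment, the part after its first '>', join once, delete stray '>' and strip.
import Mathlib
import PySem

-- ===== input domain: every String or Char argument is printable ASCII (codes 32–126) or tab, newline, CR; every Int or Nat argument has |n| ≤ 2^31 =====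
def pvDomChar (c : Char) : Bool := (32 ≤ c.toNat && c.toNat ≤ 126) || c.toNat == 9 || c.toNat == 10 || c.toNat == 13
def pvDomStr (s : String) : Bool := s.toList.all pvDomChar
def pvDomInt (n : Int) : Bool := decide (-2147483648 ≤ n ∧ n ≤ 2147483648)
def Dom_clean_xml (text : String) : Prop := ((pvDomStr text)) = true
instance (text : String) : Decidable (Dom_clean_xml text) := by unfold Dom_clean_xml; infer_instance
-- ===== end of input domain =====

-- B replaces A's char-by-char in_tag state machine with a split-on-'<' / keep-after-first-'>'
-- decomposition (objective: idiomatic); same entity-unescaping prefix, same return value.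

-- ===== PORT A =====
def clean_xml (text : String) : String :=
  let t1 := PySem.Str.replace (PySem.Str.replace text "&lt;" "<") "&gt;" ">"
  let t2 := PySem.Str.replace (PySem.Str.replace (PySem.Str.replace t1 "&amp;" "&") "&quot;" "\"") "&apos;" "'"
  -- for char in text: the in_tag state machine, result built left to right
  let res := t2.toList.foldl
    (fun (st : List Char × Bool) c =>
      if c = '<' then (st.1, true)
      else if c = '>' then (st.1, false)
      else if st.2 = false then (st.1 ++ [c], st.2)
      else st) ([], false)
  PySem.Str.strip (String.ofList res.1)

-- ===== PORT B =====
-- part.partition(">")[2], ported by hand (PySem has no partition): the text after the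
-- first '>' (empty if there is none) — exact for the one-character separator ">".
def afterGt (part : List Char) : List Char :=
  (part.dropWhile (fun c => c ≠ '>')).drop 1

def clean_xml_alt (text : String) : String :=
  let t1 := PySem.Str.replace (PySem.Str.replace text "&lt;" "<") "&gt;" ">"
  let t2 := PySem.Str.replace (PySem.Str.replace (PySem.Str.replace t1 "&amp;" "&") "&quot;" "\"") "&apos;" "'"
  -- head, *rest = text.split("<")  (sep "<" is non-empty, so Python's split always returns)
  let parts := PySem.Chars.splitOn t2.toList ['<']
  -- pieces = [head] + [part.partition(">")[2] for part in rest]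
  let pieces := parts.take 1 ++ (parts.drop 1).map afterGt
  PySem.Str.strip (PySem.Str.replace (String.ofList (PySem.Chars.join [] pieces)) ">" "")

-- ===== PRECONDITION & SPEC =====
def Spec_clean_xml (text : String) (out : String) : Prop := out = clean_xml_alt text
instance (text : String) (out : String) : Decidable (Spec_clean_xml text out) := by unfold Spec_clean_xml; infer_instance

-- ===== CLAIM (what is proved, stated in full; the proofs are below) =====
def Claim_equal_clean_xml : Prop := ∀ (text : String), Dom_clean_xml text → Spec_clean_xml text (clean_xml text)

-- ===== LEMMAS AND PROOFS =====

-- A's state machine as a structural recursion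
def loopA : List Char → Bool → List Char
  | [], _ => []
  | c :: cs, b =>
    if c = '<' then loopA cs true
    else if c = '>' then loopA cs false
    else if b = false then c :: loopA cs b
    else loopA cs b

-- splitting on '<' as a structural recursion
def mySplit : List Char → List (List Char)
  | [] => [[]]
  | c :: cs =>
    if c = '<' then [] :: mySplit cs
    else (c :: (mySplit cs).headD []) :: (mySplit cs).tail

theorem mySplit_ne_nil (cs : List Char) : mySplit cs ≠ [] := by
  cases cs with
  | nil => simp [mySplit]
  | cons c cs => simp only [mySplit]; split <;> simp

theorem foldA_eq (cs : List Char) : ∀ (acc : List Char) (b : Bool),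
    (cs.foldl (fun (st : List Char × Bool) c =>
      if c = '<' then (st.1, true)
      else if c = '>' then (st.1, false)
      else if st.2 = false then (st.1 ++ [c], st.2)
      else st) (acc, b)).1 = acc ++ loopA cs b := by
  induction cs with
  | nil => intro acc b; simp [loopA]
  | cons c cs ih =>
    intro acc b
    simp only [List.foldl_cons, loopA]
    by_cases h1 : c = '<'
    · simp [h1, ih]
    · by_cases h2 : c = '>'
      · simp [h2, ih]
      · cases b with
        | false => simp [h1, h2, ih]
        | true => simp [h1, h2, ih]

theorem go_split (fuel : Nat) : ∀ (l cur : List Char) (accs : List (List Char)),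
    l.length ≤ fuel →
    PySem.Chars.splitOn.go ['<'] fuel l cur accs =
      accs.reverse ++ (cur.reverse ++ (mySplit l).headD []) :: (mySplit l).tail := by
  induction fuel with
  | zero =>
    intro l cur accs h
    have : l = [] := List.eq_nil_of_length_eq_zero (Nat.le_zero.mp h)
    subst this
    simp [PySem.Chars.splitOn.go, mySplit]
  | succ fuel ih =>
    intro l cur accs h
    cases l with
    | nil => simp [PySem.Chars.splitOn.go, mySplit]
    | cons c rest =>
      simp only [PySem.Chars.splitOn.go]
      by_cases hc : c = '<'
      · subst hc
        simp only [List.isPrefixOf, BEq.rfl, Bool.true_and, if_pos,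
          List.length_cons, List.length_nil, List.drop_succ_cons, List.drop_zero]
        rw [ih rest [] (List.reverse cur :: accs) (by simpa using Nat.le_of_succ_le_succ h)]
        rcases hne : mySplit rest with _ | ⟨p, ps⟩
        · exact absurd hne (mySplit_ne_nil rest)
        · simp [mySplit, hne]
      · have hpre : List.isPrefixOf ['<'] (c :: rest) = false := by
          simp [List.isPrefixOf]; exact fun h' => hc h'.symm
        simp only [hpre, Bool.false_eq_true, if_false]
        rw [ih rest (c :: cur) accs (by simpa using Nat.le_of_succ_le_succ h)]
        rcases hne : mySplit rest with _ | ⟨p, ps⟩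
        · exact absurd hne (mySplit_ne_nil rest)
        · simp [mySplit, hc, hne]

theorem splitOn_eq (l : List Char) : PySem.Chars.splitOn l ['<'] = mySplit l := by
  unfold PySem.Chars.splitOn
  rw [go_split (l.length + 1) l [] [] (Nat.le_succ _)]
  rcases hne : mySplit l with _ | ⟨p, ps⟩
  · exact absurd hne (mySplit_ne_nil l)
  · simp

theorem go_replace (fuel : Nat) : ∀ (l acc : List Char),
    l.length ≤ fuel →
    PySem.Chars.replace.go ['>'] [] fuel l acc =
      acc.reverse ++ l.filter (fun c => c ≠ '>') := by
  induction fuel with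
  | zero =>
    intro l acc h
    have : l = [] := List.eq_nil_of_length_eq_zero (Nat.le_zero.mp h)
    subst this
    simp [PySem.Chars.replace.go]
  | succ fuel ih =>
    intro l acc h
    cases l with
    | nil => simp [PySem.Chars.replace.go]
    | cons c rest =>
      simp only [PySem.Chars.replace.go]
      by_cases hc : c = '>'
      · subst hc
        simp only [List.isPrefixOf, BEq.rfl, Bool.true_and, if_pos,
          List.length_cons, List.length_nil, List.drop_succ_cons, List.drop_zero,
          List.reverse_nil, List.nil_append]
        rw [ih rest acc (by simpa using Nat.le_of_succ_le_succ h)]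
        simp
      · have hpre : List.isPrefixOf ['>'] (c :: rest) = false := by
          simp [List.isPrefixOf]; exact fun h' => hc h'.symm
        simp only [hpre, Bool.false_eq_true, if_false]
        rw [ih rest (c :: acc) (by simpa using Nat.le_of_succ_le_succ h)]
        simp [hc]

theorem replace_gt (l : List Char) :
    PySem.Chars.replace l ['>'] [] = l.filter (fun c => c ≠ '>') := by
  unfold PySem.Chars.replace
  simp only [List.isEmpty_cons, Bool.false_eq_true, if_false]
  exact go_replace l.length l [] le_rfl

theorem join_nil_eq_flatten (ps : List (List Char)) :
    PySem.Chars.join [] ps = ps.flatten := by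
  unfold PySem.Chars.join
  induction ps with
  | nil => simp [List.intercalate]
  | cons p ps ih => cases ps <;> simp_all [List.intercalate]

@[simp] theorem afterGt_nil : afterGt [] = [] := rfl
theorem afterGt_cons (c : Char) (cs : List Char) :
    afterGt (c :: cs) = if c = '>' then cs else afterGt cs := by
  by_cases h : c = '>' <;> simp [afterGt, h]

-- the core equivalence: both characterizations of "drop tags, drop stray '>'"
theorem main_eq (n : Nat) : ∀ (cs : List Char), cs.length ≤ n →
    (((mySplit cs).headD [] ++ ((mySplit cs).tail.map afterGt).flatten).filter
        (fun c => c ≠ '>') = loopA cs false)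
    ∧ (((mySplit cs).map afterGt).flatten.filter (fun c => c ≠ '>') = loopA cs true) := by
  induction n with
  | zero =>
    intro cs h
    have : cs = [] := List.eq_nil_of_length_eq_zero (Nat.le_zero.mp h)
    subst this
    simp [mySplit, loopA]
  | succ n ih =>
    intro cs h
    cases cs with
    | nil => simp [mySplit, loopA]
    | cons c rest =>
      have hr : rest.length ≤ n := Nat.le_of_succ_le_succ h
      obtain ⟨ih1, ih2⟩ := ih rest hr
      rcases hne : mySplit rest with _ | ⟨p, ps⟩
      case cons.nil => exact absurd hne (mySplit_ne_nil rest)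
      rw [hne] at ih1 ih2
      by_cases hc : c = '<'
      · subst hc
        constructor
        · simpa [mySplit, hne, loopA] using ih2
        · simpa [mySplit, hne, loopA] using ih2
      · by_cases hg : c = '>'
        · subst hg
          constructor
          · simpa [mySplit, hne, loopA, hc] using ih1
          · simpa [mySplit, hne, loopA, hc, afterGt_cons] using ih1
        · constructor
          · simpa [mySplit, hne, loopA, hc, hg] using ih1
          · simpa [mySplit, hne, loopA, hc, hg, afterGt_cons] using ih2

set_option maxHeartbeats 1000000 in
theorem core_eq (s : String) :
    PySem.Str.strip (String.ofList
        ((s.toList.foldl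
          (fun (st : List Char × Bool) c =>
            if c = '<' then (st.1, true)
            else if c = '>' then (st.1, false)
            else if st.2 = false then (st.1 ++ [c], st.2)
            else st) ([], false)).1)) =
    PySem.Str.strip (PySem.Str.replace (String.ofList (PySem.Chars.join []
        ((PySem.Chars.splitOn s.toList ['<']).take 1 ++
         ((PySem.Chars.splitOn s.toList ['<']).drop 1).map afterGt))) ">" "") := by
  apply String.toList_inj.mp
  rw [PySem.Str.toList_strip, PySem.Str.toList_strip]
  apply congrArg PySem.Chars.strip
  rw [PySem.Str.toList_replace]
  rw [foldA_eq s.toList [] false, List.nil_append, splitOn_eq]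
  rcases hne : mySplit s.toList with _ | ⟨p, ps⟩
  · exact absurd hne (mySplit_ne_nil s.toList)
  · obtain ⟨h1, _⟩ := main_eq s.toList.length s.toList le_rfl
    rw [hne] at h1
    simp only [List.take_succ_cons, List.take_zero, List.drop_succ_cons, List.drop_zero,
      List.singleton_append]
    have htl : (String.ofList (PySem.Chars.join [] (p :: ps.map afterGt))).toList
        = PySem.Chars.join [] (p :: ps.map afterGt) := by simp
    rw [htl, join_nil_eq_flatten]
    have : (">" : String).toList = ['>'] := rfl
    have h0 : ("" : String).toList = [] := rfl
    rw [this, h0, replace_gt]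
    simpa using h1.symm

-- ===== VERDICT (by name: the statement is the Claim_ definition above) =====
set_option maxHeartbeats 1000000 in
theorem clean_xml_spec : Claim_equal_clean_xml := by
  intro text _
  unfold Spec_clean_xml
  simp only [clean_xml, clean_xml_alt]
  exact core_eq _
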